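-- pv_equiv track=rewrite | github.com/Ameer1428/EduHire.ai | backend/core/job_api.py | _infer_experience_level
-- ===== SOURCE A (Python) =====
-- def _infer_experience_level(description: str) -> str:
--     """Infer experience level from description"""
--     desc_lower = str(description).lower()
--
--     if any(term in desc_lower for term in ['senior', 'lead', 'principal', '5+ years', '8+ years']):
--         return "Senior"
--     elif any(term in desc_lower for term in ['mid-level', 'intermediate', '3+ years', '2+ years']):
--         return "Mid-level"
--     elif any(term in desc_lower for term in ['junior', 'entry level', 'fresher', '0-2 years']):
--         return "Entry-level"
--     else:
--         return "Not specified"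
-- ===== SOURCE B (Python) =====
-- _TERM_RANK = {
--     'senior': 0, 'lead': 0, 'principal': 0, '5+ years': 0, '8+ years': 0,
--     'mid-level': 1, 'intermediate': 1, '3+ years': 1, '2+ years': 1,
--     'junior': 2, 'entry level': 2, 'fresher': 2, '0-2 years': 2,
-- }
-- _LABELS = ["Senior", "Mid-level", "Entry-level", "Not specified"]
--
-- def _infer_experience_level(description: str) -> str:
--     text = str(description).lower()
--     best = 3
--     for term, rank in _TERM_RANK.items():
--         if rank < best and term in text:
--             best = rank
--     return _LABELS[best]
-- ===== Notes on version B (the rewrite author's own statement) =====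
-- stated objective: alternative
-- what changed: Replaced the staged if/elif level checks (each short-circuiting over its own term list) with a single flat pass over a term-to-rank dictionary keeping a minimum-rank accumulator, then indexing the label list by the best rank.
import Mathlib
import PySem

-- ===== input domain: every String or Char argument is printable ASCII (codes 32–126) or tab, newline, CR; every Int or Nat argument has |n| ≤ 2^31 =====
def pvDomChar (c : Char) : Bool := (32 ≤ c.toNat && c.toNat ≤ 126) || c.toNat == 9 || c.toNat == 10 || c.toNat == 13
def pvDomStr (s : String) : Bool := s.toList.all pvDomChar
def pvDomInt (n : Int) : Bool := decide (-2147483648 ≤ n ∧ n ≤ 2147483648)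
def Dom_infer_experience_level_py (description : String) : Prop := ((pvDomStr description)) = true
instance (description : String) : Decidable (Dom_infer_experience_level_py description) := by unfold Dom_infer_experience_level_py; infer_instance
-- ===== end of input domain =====

-- B replaces A's staged if/elif checks with one flat min-rank accumulator pass over a term->rank table (alternative decomposition; same behaviour).

-- ===== PORT A =====
def infer_experience_level_py (description : String) : String :=
  let desc_lower := PySem.Str.lower description
  if ["senior", "lead", "principal", "5+ years", "8+ years"].any
      (fun term => PySem.Str.isIn term desc_lower) then "Senior"
  else if ["mid-level", "intermediate", "3+ years", "2+ years"].any
      (fun term => PySem.Str.isIn term desc_lower) then "Mid-level"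
  else if ["junior", "entry level", "fresher", "0-2 years"].any
      (fun term => PySem.Str.isIn term desc_lower) then "Entry-level"
  else "Not specified"

-- ===== PORT B =====
-- _TERM_RANK as an association list in insertion order (dict iteration order)
def pvTermRank : List (String × Nat) :=
  [("senior", 0), ("lead", 0), ("principal", 0), ("5+ years", 0), ("8+ years", 0),
   ("mid-level", 1), ("intermediate", 1), ("3+ years", 1), ("2+ years", 1),
   ("junior", 2), ("entry level", 2), ("fresher", 2), ("0-2 years", 2)]

def pvLabels : List String := ["Senior", "Mid-level", "Entry-level", "Not specified"]

def infer_experience_level_py_alt (description : String) : String :=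
  let text := PySem.Str.lower description
  let best := pvTermRank.foldl
    (fun best p => if p.2 < best && PySem.Str.isIn p.1 text then p.2 else best) 3
  pvLabels.getD best "Not specified"

-- ===== PRECONDITION & SPEC =====
def Spec_infer_experience_level_py (description : String) (out : String) : Prop := out = infer_experience_level_py_alt description
instance (description : String) (out : String) : Decidable (Spec_infer_experience_level_py description out) := by unfold Spec_infer_experience_level_py; infer_instance

-- ===== CLAIM (what is proved, stated in full; the proofs are below) =====
def Claim_equal_infer_experience_level_py : Prop := ∀ (description : String), Dom_infer_experience_level_py description → Spec_infer_experience_level_py description (infer_experience_level_py description)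

-- ===== LEMMAS AND PROOFS =====

def pvF (P : String → Bool) : Nat → (String × Nat) → Nat :=
  fun b p => if p.2 < b && P p.1 then p.2 else b

theorem pvFold_ge (P : String → Bool) (l : List String) (r best : Nat) (h : best ≤ r) :
    (l.map (fun s => (s, r))).foldl (pvF P) best = best := by
  induction l with
  | nil => rfl
  | cons x xs ih => simp [pvF, Nat.not_lt.mpr h, ih]

theorem pvFold_lt (P : String → Bool) (l : List String) (r best : Nat) (h : r < best) :
    (l.map (fun s => (s, r))).foldl (pvF P) best = if l.any P then r else best := by
  induction l with
  | nil => rfl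
  | cons x xs ih =>
    by_cases hx : P x
    · simp [pvF, h, hx, pvFold_ge P xs r r (Nat.le_refl r)]
    · simp [pvF, hx, ih]

theorem infer_experience_level_py_eq_alt (description : String) :
    infer_experience_level_py description = infer_experience_level_py_alt description := by
  unfold infer_experience_level_py infer_experience_level_py_alt
  have hlist : pvTermRank =
      (["senior", "lead", "principal", "5+ years", "8+ years"].map (fun s => (s, 0)))
      ++ (["mid-level", "intermediate", "3+ years", "2+ years"].map (fun s => (s, 1)))
      ++ (["junior", "entry level", "fresher", "0-2 years"].map (fun s => (s, 2))) := rfl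
  set text := PySem.Str.lower description with htext
  set P : String → Bool := fun t => PySem.Str.isIn t text with hP
  have hfun : (fun (best : Nat) (p : String × Nat) =>
      if p.2 < best && PySem.Str.isIn p.1 text then p.2 else best) = pvF P := rfl
  rw [hlist]
  simp only [hfun, List.foldl_append]
  by_cases h0 : ["senior", "lead", "principal", "5+ years", "8+ years"].any P
  · rw [pvFold_lt P _ 0 3 (by omega), if_pos h0, if_pos h0,
      pvFold_ge P _ 1 0 (by omega), pvFold_ge P _ 2 0 (by omega)]
    rfl
  · rw [pvFold_lt P _ 0 3 (by omega), if_neg h0, if_neg h0]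
    by_cases h1 : ["mid-level", "intermediate", "3+ years", "2+ years"].any P
    · rw [pvFold_lt P _ 1 3 (by omega), if_pos h1, if_pos h1,
        pvFold_ge P _ 2 1 (by omega)]
      rfl
    · rw [pvFold_lt P _ 1 3 (by omega), if_neg h1, if_neg h1]
      by_cases h2 : ["junior", "entry level", "fresher", "0-2 years"].any P
      · rw [pvFold_lt P _ 2 3 (by omega), if_pos h2, if_pos h2]; rfl
      · rw [pvFold_lt P _ 2 3 (by omega), if_neg h2, if_neg h2]; rfl

-- ===== VERDICT (by name: the statement is the Claim_ definition above) =====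
theorem infer_experience_level_py_spec : Claim_equal_infer_experience_level_py := by
  intro d _
  unfold Spec_infer_experience_level_py
  exact infer_experience_level_py_eq_alt d
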